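-- pv_equiv track=rewrite | github.com/pypi-data/pypi-mirror-402 | packages/runbooks/runbooks-1.3.0-py3-none-any.whl/runbooks/vpc/vpc_cleanup_integration.py | _format_tags_string
-- ===== SOURCE A (Python) =====
-- from typing import Any, Dict, List, Optional, Set, Tuple
--
-- def _format_tags_string(tags: Dict[str, str]) -> str:
--     """Format tags as 'key=value,key2=value2' string"""
--     if not tags:
--         return "none"
--
--     # Limit to most important tags to avoid overwhelming display
--     important_tags = ["Name", "Environment", "Owner", "Team", "Department", "CostCenter"]
--     filtered_tags = {}
--
--     # First include important tags
--     for key in important_tags: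
--         if key in tags:
--             filtered_tags[key] = tags[key]
--
--     # Then add remaining tags up to a reasonable limit
--     remaining_count = 6 - len(filtered_tags)
--     for key, value in tags.items():
--         if key not in filtered_tags and remaining_count > 0:
--             filtered_tags[key] = value
--             remaining_count -= 1
--
--     return ",".join([f"{k}={v}" for k, v in filtered_tags.items()])
-- ===== SOURCE B (Python) =====
-- def _format_tags_string(tags):
--     """Format tags as 'key=value,key2=value2' string"""
--     if not tags:
--         return "none"
--     important_tags = ["Name", "Environment", "Owner", "Team", "Department", "CostCenter"]
--     # priority rank: important keys get their index (0..5), everything else 6 + dict position,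
--     # so a single stable-free sort by rank yields: important keys in priority order, then the rest
--     prio = {k: 6 + i for i, k in enumerate(tags)}
--     prio.update({k: i for i, k in enumerate(important_tags)})
--     keys = sorted(tags, key=prio.get)
--     return ",".join(f"{k}={tags[k]}" for k in keys[:6])
-- ===== Notes on version B (the rewrite author's own statement) =====
-- stated objective: alternative
-- what changed: B replaces A's two staged fill loops (important-keys pass, then a counter-driven scan adding remaining dict entries) by a sort: each key gets a numeric priority rank (important keys 0-5, others 6+dict position), the keys are sorted once by that rank, and the output is a join over the first six sorted keys.
import Mathlib
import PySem

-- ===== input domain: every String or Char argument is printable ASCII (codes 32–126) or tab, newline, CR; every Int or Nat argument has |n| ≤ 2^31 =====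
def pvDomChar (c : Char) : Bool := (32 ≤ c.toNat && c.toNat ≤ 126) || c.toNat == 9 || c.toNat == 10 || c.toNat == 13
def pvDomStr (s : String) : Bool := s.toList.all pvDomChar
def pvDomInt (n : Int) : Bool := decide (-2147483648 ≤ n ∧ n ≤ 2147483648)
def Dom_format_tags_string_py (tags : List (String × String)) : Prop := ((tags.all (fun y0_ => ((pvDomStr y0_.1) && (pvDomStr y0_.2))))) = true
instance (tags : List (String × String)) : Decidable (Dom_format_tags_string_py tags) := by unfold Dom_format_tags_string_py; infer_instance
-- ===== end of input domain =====

-- B replaces A's two staged fill loops (important keys first, then a counter-driven scan of the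
-- dict) by ONE sort: every key gets a priority rank and a single sorted+slice produces the output
-- order (objective: alternative); same return value on every input.

def pvImportant : List String := ["Name", "Environment", "Owner", "Team", "Department", "CostCenter"]

-- ===== PORT A =====
-- the dict argument arrives as an association list; 'PySem.Dict.ofList' is the dict it denotes
def format_tags_string_py (tags : List (String × String)) : String :=
  let d := PySem.Dict.ofList tags
  if d.size = 0 then "none"
  else
    -- first include important tags
    let f0 := pvImportant.foldl
      (fun f k => if d.contains k then f.insert k (d.getD k "") else f)
      PySem.Dict.empty
    -- then add remaining tags while remaining_count > 0
    let st := d.items.foldl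
      (fun (st : PySem.Dict String String × Int) kv =>
        if st.1.contains kv.1 = false ∧ st.2 > 0 then (st.1.insert kv.1 kv.2, st.2 - 1) else st)
      (f0, 6 - (f0.size : Int))
    PySem.Str.join "," (st.1.items.map (fun kv => kv.1 ++ "=" ++ kv.2))

-- ===== PORT B =====
def format_tags_string_py_alt (tags : List (String × String)) : String :=
  let d := PySem.Dict.ofList tags
  if d.size = 0 then "none"
  else
    -- prio = {k: 6 + i for i, k in enumerate(tags)}
    let prio0 := (PySem.List.enumerate d.keys 0).foldl
      (fun (p : PySem.Dict String Int) ik => p.insert ik.2 (6 + ik.1)) PySem.Dict.empty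
    -- prio.update({k: i for i, k in enumerate(important_tags)})
    let prio := (PySem.List.enumerate pvImportant 0).foldl
      (fun (p : PySem.Dict String Int) ik => p.insert ik.2 ik.1) prio0
    -- sorted(tags, key=prio.get); prio.get k is never None on a key of tags, so getD is exact here
    let keys := PySem.List.sorted d.keys (fun k => prio.getD k 0) false
    PySem.Str.join "," ((keys.take 6).map (fun k => k ++ "=" ++ d.getD k ""))

-- ===== PRECONDITION & SPEC =====
def Spec_format_tags_string_py (tags : List (String × String)) (out : String) : Prop := out = format_tags_string_py_alt tags
instance (tags : List (String × String)) (out : String) : Decidable (Spec_format_tags_string_py tags out) := by unfold Spec_format_tags_string_py; infer_instance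

-- ===== CLAIM (what is proved, stated in full; the proofs are below) =====
def Claim_equal_format_tags_string_py : Prop := ∀ (tags : List (String × String)), Dom_format_tags_string_py tags → Spec_format_tags_string_py tags (format_tags_string_py tags)

-- ===== LEMMAS AND PROOFS =====

-- phase 1 of A: the fold over the important keys appends exactly the present ones
theorem pv_phase1 (d : PySem.Dict String String) :
    ∀ (ks : List String) (f : PySem.Dict String String), ks.Nodup →
      (∀ k ∈ ks, f.contains k = false) →
      (ks.foldl (fun f k => if d.contains k then f.insert k (d.getD k "") else f) f).items
        = f.items ++ (ks.filter (fun k => d.contains k)).map (fun k => (k, d.getD k "")) := by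
  intro ks
  induction ks with
  | nil => intro f _ _; simp
  | cons k ks ih =>
    intro f hnd hf
    have hk : f.contains k = false := hf k (by simp)
    have hnd' := List.nodup_cons.mp hnd
    have hftail : ∀ k' ∈ ks, f.contains k' = false :=
      fun k' hk' => hf k' (List.mem_cons_of_mem _ hk')
    by_cases hd : d.contains k
    · have hf' : ∀ k' ∈ ks, (f.insert k (d.getD k "")).contains k' = false := by
        intro k' hk'
        rw [PySem.Dict.contains_insert]
        have : k' ≠ k := by rintro rfl; exact hnd'.1 hk'
        simp [this, hftail k' hk']
      simp only [List.foldl_cons, if_pos hd]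
      rw [ih _ hnd'.2 hf', PySem.Dict.items_insert_of_not_contains _ _ hk]
      simp [hd]
    · simp only [List.foldl_cons, if_neg hd]
      rw [ih _ hnd'.2 hftail]
      simp [hd]

-- phase 2 of A: the counter-driven fill appends the first r items with new keys
theorem pv_phase2 :
    ∀ (l : List (String × String)) (f : PySem.Dict String String) (r : Int),
      (l.map (·.1)).Nodup →
      ((l.foldl
          (fun (st : PySem.Dict String String × Int) kv =>
            if st.1.contains kv.1 = false ∧ st.2 > 0 then (st.1.insert kv.1 kv.2, st.2 - 1) else st)
          (f, r)).1).items
        = f.items ++ ((l.filter (fun kv => !f.contains kv.1)).take r.toNat) := by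
  intro l
  induction l with
  | nil => intro f r _; simp
  | cons kv l ih =>
    intro f r hnd
    simp only [List.map_cons] at hnd
    have hnd' := List.nodup_cons.mp hnd
    by_cases hc : f.contains kv.1
    · simp only [List.foldl_cons]
      rw [if_neg (by simp [hc])]
      rw [ih f r hnd'.2]
      simp [hc]
    · have hc' : f.contains kv.1 = false := by simpa using hc
      by_cases hr : r > 0
      · simp only [List.foldl_cons]
        rw [if_pos ⟨hc', hr⟩]
        rw [ih (f.insert kv.1 kv.2) (r - 1) hnd'.2]
        rw [PySem.Dict.items_insert_of_not_contains _ _ hc']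
        have hfilt : l.filter (fun kv' => !(f.insert kv.1 kv.2).contains kv'.1)
            = l.filter (fun kv' => !f.contains kv'.1) := by
          apply List.filter_congr
          intro kv' hkv'
          rw [PySem.Dict.contains_insert]
          have hne : kv'.1 ≠ kv.1 := by
            intro h; exact hnd'.1 (h ▸ List.mem_map_of_mem hkv')
          simp [hne]
        rw [hfilt]
        have hto : r.toNat = (r - 1).toNat + 1 := by omega
        rw [List.filter_cons_of_pos (by simp [hc']), hto, List.take_succ_cons]
        simp
      · simp only [List.foldl_cons]
        rw [if_neg (by tauto)]
        rw [ih f r hnd'.2]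
        have h0 : r.toNat = 0 := by omega
        simp [h0]

theorem pv_empty_items : (PySem.Dict.empty : PySem.Dict String String).items = [] := by
  simp [PySem.Dict.empty]

-- A's formatted list coincides with format over the ordered key list (P ++ Q).take 6
theorem pv_main (d : PySem.Dict String String) (hnod : d.keys.Nodup) :
    ((d.items.foldl
        (fun (st : PySem.Dict String String × Int) kv =>
          if st.1.contains kv.1 = false ∧ st.2 > 0 then (st.1.insert kv.1 kv.2, st.2 - 1) else st)
        (pvImportant.foldl
            (fun f k => if d.contains k then f.insert k (d.getD k "") else f) PySem.Dict.empty,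
         6 - ((pvImportant.foldl
            (fun f k => if d.contains k then f.insert k (d.getD k "") else f) PySem.Dict.empty).size : Int))).1).items.map
      (fun kv => kv.1 ++ "=" ++ kv.2)
    = (((pvImportant.filter (fun k => d.contains k)
          ++ d.keys.filter (fun k => !pvImportant.contains k)).take 6).map
        (fun k => k ++ "=" ++ d.getD k "")) := by
  set P := pvImportant.filter (fun k => d.contains k) with hPdef
  set f0 := pvImportant.foldl
      (fun f k => if d.contains k then f.insert k (d.getD k "") else f) PySem.Dict.empty with hf0
  have h1 : f0.items = P.map (fun k => (k, d.getD k "")) := by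
    rw [hf0, pv_phase1 d pvImportant PySem.Dict.empty (by decide)
      (fun k _ => PySem.Dict.contains_empty k), pv_empty_items, List.nil_append]
  have hsize : f0.size = P.length := by
    have := congrArg List.length h1
    simpa [PySem.Dict.size] using this
  have hP6 : P.length ≤ 6 := by
    have := List.length_filter_le (fun k => d.contains k) pvImportant
    simpa [pvImportant] using this
  have hkeysdef : d.keys = d.items.map (·.1) := rfl
  have hnod' : (d.items.map (·.1)).Nodup := hkeysdef ▸ hnod
  rw [pv_phase2 d.items f0 (6 - (f0.size : Int)) hnod']
  -- rewrite the phase-2 filter predicate to key-not-important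
  have hfilt : d.items.filter (fun kv => !f0.contains kv.1)
      = d.items.filter (fun kv => !pvImportant.contains kv.1) := by
    apply List.filter_congr
    intro kv hkv
    have hdk : d.contains kv.1 = true :=
      (PySem.Dict.contains_iff_mem_keys d kv.1).mpr (hkeysdef ▸ List.mem_map_of_mem hkv)
    have hkeys0 : f0.keys = P := by
      show f0.items.map (·.1) = P
      rw [h1, List.map_map]
      exact (List.map_congr_left fun k _ => rfl).trans (List.map_id P)
    rw [PySem.Dict.contains_eq_decide_mem_keys, hkeys0]
    simp [hPdef, List.mem_filter, hdk]
  rw [hfilt]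
  have hto : ((6 : Int) - (f0.size : Int)).toNat = 6 - P.length := by
    rw [hsize]; omega
  rw [hto]
  -- right-hand side: split the slice at the important prefix
  rw [List.take_append, List.take_of_length_le hP6]
  have hQ : d.keys.filter (fun k => !pvImportant.contains k)
      = (d.items.filter (fun kv => !pvImportant.contains kv.1)).map (·.1) := by
    rw [hkeysdef, List.filter_map]; rfl
  rw [hQ]
  rw [h1, ← List.map_take]
  simp only [List.map_append, List.map_map]
  congr 1
  apply List.map_congr_left
  intro kv hkv
  have hmem : kv ∈ d.items := List.mem_of_mem_filter (List.mem_of_mem_take hkv)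
  have hgd : d.getD kv.1 "" = kv.2 :=
    PySem.Dict.getD_of_mem_items d hmem hnod ""
  simp [Function.comp, hgd]

-- lookup in a dict built by a fold of inserts over pairs with distinct keys
theorem pv_get?_foldl_insert {ν : Type} (f : Int × String → ν) :
    ∀ (l : List (Int × String)) (p : PySem.Dict String ν) (k : String),
      (l.map (·.2)).Nodup →
      (l.foldl (fun p ik => p.insert ik.2 (f ik)) p).get? k
        = (match l.find? (fun ik => ik.2 == k) with
           | some ik => some (f ik)
           | none => p.get? k) := by
  intro l
  induction l with
  | nil => intro p k _; simp
  | cons ik l ih =>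
    intro p k hnd
    simp only [List.map_cons] at hnd
    have hnd' := List.nodup_cons.mp hnd
    by_cases hk : ik.2 = k
    · subst hk
      have hfind : l.find? (fun ik' => ik'.2 == ik.2) = none := by
        rw [List.find?_eq_none]
        intro x hx
        simp only [beq_iff_eq]
        intro h; exact hnd'.1 (h ▸ List.mem_map_of_mem hx)
      simp only [List.foldl_cons]
      rw [ih _ _ hnd'.2, hfind, List.find?_cons_of_pos (by simp)]
      exact PySem.Dict.get?_insert_self p ik.2 (f ik)
    · simp only [List.foldl_cons]
      rw [ih _ _ hnd'.2, List.find?_cons_of_neg (by simp [hk])]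
      cases hfind : l.find? (fun ik' => ik'.2 == k) with
      | some _ => rfl
      | none => exact PySem.Dict.get?_insert_of_ne p (f ik) (Ne.symm (by simpa using hk))

-- find? over an enumeration locates the key at its index
theorem pv_find?_enumerate :
    ∀ (xs : List String) (s : Int) (k : String), k ∈ xs →
      (PySem.List.enumerate xs s).find? (fun ik => ik.2 == k)
        = some (s + (xs.idxOf k : Int), k) := by
  intro xs
  induction xs with
  | nil => intro s k h; simp at h
  | cons x xs ih =>
    intro s k h
    rw [PySem.List.enumerate_cons]
    by_cases hx : x = k
    · subst hx
      rw [List.find?_cons_of_pos (by simp), List.idxOf_cons_self]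
      simp
    · rw [List.find?_cons_of_neg (by simp [hx]),
        ih (s + 1) k (by cases h with | head => exact absurd rfl hx | tail _ h => exact h)]
      rw [List.idxOf_cons_ne _ hx]
      congr 2
      push_cast
      ring

theorem pv_find?_enumerate_none (xs : List String) (s : Int) (k : String) (h : k ∉ xs) :
    (PySem.List.enumerate xs s).find? (fun ik => ik.2 == k) = none := by
  rw [List.find?_eq_none]
  intro ik hik
  obtain ⟨j, hj, rfl⟩ := (PySem.List.mem_enumerate_iff _ _ _).mp hik
  simp only [beq_iff_eq]
  intro he; exact h (he ▸ List.getElem_mem hj)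

-- B's priority dict: the rank of every key of d
theorem pv_rank (d : PySem.Dict String String) (hnod : d.keys.Nodup) (k : String) (hk : k ∈ d.keys) :
    (((PySem.List.enumerate pvImportant 0).foldl
        (fun (p : PySem.Dict String Int) ik => p.insert ik.2 ik.1)
        ((PySem.List.enumerate d.keys 0).foldl
          (fun (p : PySem.Dict String Int) ik => p.insert ik.2 (6 + ik.1)) PySem.Dict.empty))).getD k 0
      = if k ∈ pvImportant then (pvImportant.idxOf k : Int) else 6 + (d.keys.idxOf k : Int) := by
  have hnd2 : ((PySem.List.enumerate pvImportant 0).map (·.2)).Nodup := by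
    rw [PySem.List.map_snd_enumerate]; decide
  rw [PySem.Dict.getD]
  rw [pv_get?_foldl_insert (fun ik => ik.1) _ _ k hnd2]
  by_cases himp : k ∈ pvImportant
  · rw [pv_find?_enumerate pvImportant 0 k himp]
    simp [himp]
  · rw [pv_find?_enumerate_none pvImportant 0 k himp]
    have hnd1 : ((PySem.List.enumerate d.keys 0).map (·.2)).Nodup := by
      rw [PySem.List.map_snd_enumerate]; exact hnod
    rw [pv_get?_foldl_insert (fun ik => 6 + ik.1) _ _ k hnd1]
    rw [pv_find?_enumerate d.keys 0 k hk]
    simp [himp]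

-- a nodup list is strictly increasing under its own idxOf
theorem pv_pairwise_idxOf (l : List String) (h : l.Nodup) :
    l.Pairwise (fun a b => l.idxOf a < l.idxOf b) := by
  rw [List.pairwise_iff_getElem]
  intro i j hi hj hij
  rw [List.Nodup.idxOf_getElem h i hi, List.Nodup.idxOf_getElem h j hj]
  exact hij

-- B's sort puts the keys into exactly the order P ++ Q
theorem pv_sorted (d : PySem.Dict String String) (hnod : d.keys.Nodup) :
    PySem.List.sorted d.keys
      (fun k => (((PySem.List.enumerate pvImportant 0).foldl
        (fun (p : PySem.Dict String Int) ik => p.insert ik.2 ik.1)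
        ((PySem.List.enumerate d.keys 0).foldl
          (fun (p : PySem.Dict String Int) ik => p.insert ik.2 (6 + ik.1)) PySem.Dict.empty))).getD k 0)
      false
    = pvImportant.filter (fun k => d.contains k) ++ d.keys.filter (fun k => !pvImportant.contains k) := by
  set P := pvImportant.filter (fun k => d.contains k) with hPdef
  set Q := d.keys.filter (fun k => !pvImportant.contains k) with hQdef
  have hPmem : ∀ a ∈ P, a ∈ pvImportant ∧ a ∈ d.keys := by
    intro a ha
    have := List.mem_filter.mp ha
    exact ⟨this.1, (PySem.Dict.contains_iff_mem_keys d a).mp this.2⟩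
  have hQmem : ∀ a ∈ Q, a ∈ d.keys ∧ a ∉ pvImportant := by
    intro a ha
    have := List.mem_filter.mp ha
    refine ⟨this.1, fun hm => ?_⟩
    have := this.2
    simp at this
    exact this hm
  apply PySem.List.sorted_eq_of_perm_of_pairwise_lt
  · -- (P ++ Q).Perm d.keys
    have h1 : P.Perm (d.keys.filter (fun k => pvImportant.contains k)) := by
      apply (List.perm_ext_iff_of_nodup
        (List.Nodup.filter _ (by decide)) (List.Nodup.filter _ hnod)).mpr
      intro a
      constructor
      · intro ha
        obtain ⟨h1, h2⟩ := hPmem a ha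
        refine List.mem_filter.mpr ⟨h2, ?_⟩
        simpa using h1
      · intro ha
        obtain ⟨h1, h2⟩ := List.mem_filter.mp ha
        refine List.mem_filter.mpr ⟨by simpa using h2, ?_⟩
        exact (PySem.Dict.contains_iff_mem_keys d a).mpr h1
    exact (h1.append_right Q).trans (List.filter_append_perm _ d.keys)
  · -- strictly increasing ranks along P ++ Q
    rw [List.pairwise_append]
    refine ⟨?_, ?_, ?_⟩
    · have hpw : pvImportant.Pairwise
          (fun a b => pvImportant.idxOf a < pvImportant.idxOf b) :=
        pv_pairwise_idxOf pvImportant (by decide)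
      have := List.Pairwise.sublist (l₁ := P) List.filter_sublist hpw
      refine this.imp_of_mem ?_
      intro a b ha hb hab
      rw [pv_rank d hnod a (hPmem a ha).2, pv_rank d hnod b (hPmem b hb).2,
        if_pos (hPmem a ha).1, if_pos (hPmem b hb).1]
      exact_mod_cast hab
    · have hpw : d.keys.Pairwise (fun a b => d.keys.idxOf a < d.keys.idxOf b) :=
        pv_pairwise_idxOf d.keys hnod
      have := List.Pairwise.sublist (l₁ := Q) List.filter_sublist hpw
      refine this.imp_of_mem ?_
      intro a b ha hb hab
      rw [pv_rank d hnod a (hQmem a ha).1, pv_rank d hnod b (hQmem b hb).1,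
        if_neg (hQmem a ha).2, if_neg (hQmem b hb).2]
      omega
    · intro a ha b hb
      rw [pv_rank d hnod a (hPmem a ha).2, pv_rank d hnod b (hQmem b hb).1,
        if_pos (hPmem a ha).1, if_neg (hQmem b hb).2]
      have h6 : pvImportant.idxOf a < 6 := by
        have := List.idxOf_lt_length_of_mem (hPmem a ha).1
        simpa [pvImportant] using this
      have : (0:Int) ≤ (d.keys.idxOf b : Int) := Int.natCast_nonneg _
      omega

-- ===== VERDICT (by name: the statement is the Claim_ definition above) =====
theorem format_tags_string_py_spec : Claim_equal_format_tags_string_py := by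
  intro tags _
  unfold Spec_format_tags_string_py format_tags_string_py format_tags_string_py_alt
  simp only []
  by_cases hsz : (PySem.Dict.ofList tags : PySem.Dict String String).size = 0
  · simp [hsz]
  · simp only [if_neg hsz]
    rw [pv_sorted (PySem.Dict.ofList tags) (PySem.Dict.nodup_keys_ofList tags)]
    exact congrArg (PySem.Str.join ",")
      (pv_main (PySem.Dict.ofList tags) (PySem.Dict.nodup_keys_ofList tags))
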